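-- pv_equiv track=rewrite | github.com/M0ShYy/Codeco | fonctions.py | code_ascii_key
-- ===== SOURCE A (Python) =====
-- def code_ascii(text):
--     code = ""
--     for i in text:
--         code = code + " " + format(ord(str(i)), "x")
--     return code
--
-- def decode_ascii(code):
--     text = ""
--     code = code.split(":")
--     for i in code:
--         text = text + i + ' '
--     text = bytearray.fromhex(text)
--     text = text.decode()
--     return text
--
-- def code_ascii_key(text, key):
--     code = ""
--     final = ''
--     asc_secret = code_ascii(text)
--     asc_key = code_ascii(key)
--     asc_key = asc_key.split()
--     asc_secret = asc_secret.split()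
--     for i in range(len(asc_secret)):
--         calc = hex((int(asc_secret[i], 16) + int(asc_key[i % len(asc_key)], 16)) % int("7f", 16))
--         code = code + " " + calc[2:]
--     test = int("10", 16)
--     code = str(code)
--     code = code.split()
--     for i in range(len(code)):
--         if int(code[i], 16) < test:
--             code[i] = "0" + code[i]
--     for i in code:
--         final = final + " " + i
--     final = decode_ascii(final)
--     return final
-- ===== SOURCE B (Python) =====
-- def code_ascii_key(text, key):
--     out = []
--     for i, c in enumerate(text):
--         out.append(chr((ord(str(c)) + ord(str(key[i % len(key)]))) % 127))
--     return "".join(out)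
-- ===== Notes on version B (the rewrite author's own statement) =====
-- stated objective: simpler
-- what changed: B computes each output character directly as chr((ord(text[i]) + ord(key[i % len(key)])) % 127) in one pass, eliminating A's hex-encode / string-split / re-parse / zero-pad / fromhex / decode pipeline.
import Mathlib
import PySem

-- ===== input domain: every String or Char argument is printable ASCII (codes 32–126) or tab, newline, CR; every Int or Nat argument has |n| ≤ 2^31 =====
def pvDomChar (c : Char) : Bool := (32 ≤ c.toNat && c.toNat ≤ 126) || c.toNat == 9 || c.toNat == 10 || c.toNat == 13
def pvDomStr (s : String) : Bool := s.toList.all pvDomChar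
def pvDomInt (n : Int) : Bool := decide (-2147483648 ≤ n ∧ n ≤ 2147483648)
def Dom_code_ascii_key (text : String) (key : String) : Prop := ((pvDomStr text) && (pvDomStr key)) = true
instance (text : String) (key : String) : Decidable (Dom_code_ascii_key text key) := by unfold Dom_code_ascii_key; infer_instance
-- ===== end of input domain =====

-- B replaces A's hex-encode/split/re-parse/pad/fromhex/decode pipeline by one direct pass
-- building chr((ord(text[i]) + ord(key[i % len(key)])) % 127); objective: simpler.


-- ===== PORT A =====
-- Python strings are carried as List Char internally (PySem.Chars level); String at the interface.

-- hex digit character for n < 16, as format(·, "x") / hex() print it (lowercase)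
def pvHexDigitChar (n : Nat) : Char := if n < 10 then Char.ofNat (48 + n) else Char.ofNat (87 + n)

-- digits of n in base 16, most significant first, prepended to acc (the loop inside format(n,"x"))
def pvToHexAux (n : Nat) (acc : List Char) : List Char :=
  if h : n = 0 then acc else pvToHexAux (n / 16) (pvHexDigitChar (n % 16) :: acc)
  termination_by n
  decreasing_by exact Nat.div_lt_self (Nat.pos_of_ne_zero h) (by norm_num)

-- format(n, "x") for n ≥ 0 (= hex(n)[2:])
def pvToHexChars (n : Nat) : List Char := if n = 0 then ['0'] else pvToHexAux n []

-- value of one hex digit; other characters make int(s,16) raise in Python — never reached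
-- in this pipeline, where every parsed token was itself produced by pvToHexChars
def pvHexVal (c : Char) : Nat :=
  if 48 ≤ c.toNat ∧ c.toNat ≤ 57 then c.toNat - 48
  else if 97 ≤ c.toNat ∧ c.toNat ≤ 102 then c.toNat - 87
  else if 65 ≤ c.toNat ∧ c.toNat ≤ 70 then c.toNat - 55
  else 0

-- int(s, 16) on a valid lowercase hex token
def pvParseHex (cs : List Char) : Nat := cs.foldl (fun a c => 16 * a + pvHexVal c) 0

-- Python: code = ""; for i in text: code = code + " " + format(ord(str(i)), "x")
def code_ascii (text : String) : String :=
  String.ofList (text.toList.foldl (fun code c => code ++ ' ' :: pvToHexChars c.toNat) [])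

-- bytearray.fromhex: spaces between the two-digit pairs are skipped; an odd trailing digit
-- raises ValueError in Python — unreachable here (every pair was zero-padded to width 2)
def pvFromHex (cs : List Char) : List Nat :=
  match cs with
  | [] => []
  | c :: rest =>
    if c = ' ' then pvFromHex rest
    else match rest with
      | [] => []
      | d :: rest' => (16 * pvHexVal c + pvHexVal d) :: pvFromHex rest'

-- Python decode_ascii: split on ":", re-join with spaces, fromhex, .decode()
-- (.decode() is utf-8; every byte here is < 127, so it is Char.ofNat byte for byte)
def decode_ascii (code : String) : String :=
  let parts := PySem.Chars.splitOn code.toList [':']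
  let text := parts.foldl (fun t p => t ++ p ++ [' ']) ([] : List Char)
  String.ofList ((pvFromHex text).map Char.ofNat)

def code_ascii_key (text : String) (key : String) : String :=
  let asc_secret := PySem.Chars.split₀ (code_ascii text).toList
  let asc_key := PySem.Chars.split₀ (code_ascii key).toList
  -- for i in range(len(asc_secret)): code += " " + hex((int(si,16)+int(ki,16)) % 0x7f)[2:]
  let code := (List.range asc_secret.length).foldl (fun code i =>
    code ++ ' ' :: pvToHexChars
      ((pvParseHex (asc_secret.getD i []) + pvParseHex (asc_key.getD (i % asc_key.length) [])) % 127)) []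
  let code2 := PySem.Chars.split₀ code
  -- elementwise in-place zero-padding loop: code[i] = "0" + code[i] when int(code[i],16) < 0x10
  let code3 := code2.map (fun t => if pvParseHex t < 16 then '0' :: t else t)
  let final := code3.foldl (fun f t => f ++ ' ' :: t) ([] : List Char)
  decode_ascii (String.ofList final)

-- ===== PORT B =====
def code_ascii_key_alt (text : String) (key : String) : String :=
  String.ofList ((PySem.List.enumerate text.toList).map (fun p =>
    Char.ofNat ((p.2.toNat +
      ((PySem.List.pyGet? key.toList (PySem.Int.mod p.1 (key.toList.length : Int))).getD ' ').toNat) % 127)))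

-- ===== PRECONDITION & SPEC =====
-- A (and B alike) raises ZeroDivisionError when the key is empty but the text is not
-- (i % len(asc_key) with len 0); exactly those inputs are excluded.
def Pre_code_ascii_key (text : String) (key : String) : Prop := key ≠ "" ∨ text = ""
instance (text : String) (key : String) : Decidable (Pre_code_ascii_key text key) := by
  unfold Pre_code_ascii_key; infer_instance
def pvWitness_code_ascii_key : String × String := ("ab", "k")

def Spec_code_ascii_key (text : String) (key : String) (out : String) : Prop := out = code_ascii_key_alt text key
instance (text : String) (key : String) (out : String) : Decidable (Spec_code_ascii_key text key out) := by unfold Spec_code_ascii_key; infer_instance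

-- ===== CLAIM (what is proved, stated in full; the proofs are below) =====
def Claim_equal_code_ascii_key : Prop := ∀ (text : String) (key : String), Dom_code_ascii_key text key → Pre_code_ascii_key text key → Spec_code_ascii_key text key (code_ascii_key text key)

-- ===== LEMMAS AND PROOFS =====

-- hex-digit characters: codes 48–57 or 97–102
def pvIsHexDigit (c : Char) : Prop := (48 ≤ c.toNat ∧ c.toNat ≤ 57) ∨ (97 ≤ c.toNat ∧ c.toNat ≤ 102)

theorem pvHexDigitChar_isHex {m : Nat} (hm : m < 16) : pvIsHexDigit (pvHexDigitChar m) := by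
  interval_cases m <;> simp [pvHexDigitChar, pvIsHexDigit]

theorem pvHexVal_hexDigitChar {m : Nat} (hm : m < 16) : pvHexVal (pvHexDigitChar m) = m := by
  interval_cases m <;> decide

theorem pvToHexAux_append (n : Nat) : ∀ acc, pvToHexAux n acc = pvToHexAux n [] ++ acc := by
  induction n using Nat.strong_induction_on with
  | _ n ih =>
    intro acc
    by_cases h : n = 0
    · simp [pvToHexAux, h]
    · rw [pvToHexAux.eq_def, pvToHexAux.eq_def (n := n) (acc := [])]
      simp only [h, dite_false]
      rw [ih (n / 16) (Nat.div_lt_self (Nat.pos_of_ne_zero h) (by norm_num)),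
          ih (n / 16) (Nat.div_lt_self (Nat.pos_of_ne_zero h) (by norm_num)) [pvHexDigitChar (n % 16)]]
      simp

theorem pvToHexAux_isHex (n : Nat) : ∀ c ∈ pvToHexAux n [], pvIsHexDigit c := by
  induction n using Nat.strong_induction_on with
  | _ n ih =>
    intro c hc
    by_cases h : n = 0
    · simp [pvToHexAux, h] at hc
    · rw [pvToHexAux] at hc
      simp only [h, dite_false] at hc
      rw [pvToHexAux_append] at hc
      rcases List.mem_append.1 hc with h1 | h2
      · exact ih (n / 16) (Nat.div_lt_self (Nat.pos_of_ne_zero h) (by norm_num)) c h1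
      · simp at h2; subst h2; exact pvHexDigitChar_isHex (Nat.mod_lt _ (by norm_num))

theorem pvToHexChars_isHex (n : Nat) : ∀ c ∈ pvToHexChars n, pvIsHexDigit c := by
  intro c hc
  unfold pvToHexChars at hc
  split at hc
  · simp at hc; subst hc; exact Or.inl (by decide)
  · exact pvToHexAux_isHex n c hc

theorem pvToHexChars_ne_nil (n : Nat) : pvToHexChars n ≠ [] := by
  unfold pvToHexChars
  split
  · simp
  · rename_i h
    rw [pvToHexAux]
    simp only [h, dite_false]
    rw [pvToHexAux_append]
    simp

theorem pvIsHexDigit_not_space {c : Char} (h : pvIsHexDigit c) : PySem.Chars.isspace c = false := by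
  rcases h with ⟨h1, h2⟩ | ⟨h1, h2⟩ <;> simp [PySem.Chars.isspace] <;> omega

theorem pvIsHexDigit_ne_colon {c : Char} (h : pvIsHexDigit c) : c ≠ ':' := by
  intro he; subst he; rcases h with ⟨h1, h2⟩ | ⟨h1, h2⟩ <;> simp at h1 h2

theorem pvParseHex_append (cs : List Char) (d : Char) :
    pvParseHex (cs ++ [d]) = 16 * pvParseHex cs + pvHexVal d := by
  simp [pvParseHex, List.foldl_append]

theorem pvParseHex_toHexAux (n : Nat) : pvParseHex (pvToHexAux n []) = n := by
  induction n using Nat.strong_induction_on with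
  | _ n ih =>
    by_cases h : n = 0
    · simp [pvToHexAux, h, pvParseHex]
    · rw [pvToHexAux]
      simp only [h, dite_false]
      rw [pvToHexAux_append, pvParseHex_append,
        ih (n / 16) (Nat.div_lt_self (Nat.pos_of_ne_zero h) (by norm_num)),
        pvHexVal_hexDigitChar (Nat.mod_lt _ (by norm_num))]
      omega

theorem pvParseHex_toHexChars (n : Nat) : pvParseHex (pvToHexChars n) = n := by
  unfold pvToHexChars
  split
  · rename_i h; subst h; decide
  · exact pvParseHex_toHexAux n

-- ---- split₀ ----
theorem split₀_go_nonspace (ds : List Char) (h : ∀ c ∈ ds, PySem.Chars.isspace c = false) :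
    ∀ cur acc, PySem.Chars.split₀.go ds cur acc =
      if cur.reverse ++ ds = [] then acc.reverse else acc.reverse ++ [cur.reverse ++ ds] := by
  induction ds with
  | nil =>
    intro cur acc
    rw [PySem.Chars.split₀.go.eq_def]
    by_cases hc : cur = [] <;> simp [hc]
  | cons c rest ih =>
    intro cur acc
    rw [PySem.Chars.split₀.go.eq_def]
    have hcs : PySem.Chars.isspace c = false := h c (by simp)
    simp only [hcs, Bool.false_eq_true, if_false]
    rw [ih (fun d hd => h d (by simp [hd])) (c :: cur) acc]
    simp

theorem split₀_go_append_space_tok (tok : List Char) (hne : tok ≠ [])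
    (hns : ∀ c ∈ tok, PySem.Chars.isspace c = false) :
    ∀ cs cur acc, PySem.Chars.split₀.go (cs ++ ' ' :: tok) cur acc =
      PySem.Chars.split₀.go cs cur acc ++ [tok] := by
  intro cs
  induction cs with
  | nil =>
    intro cur acc
    simp only [List.nil_append]
    rw [PySem.Chars.split₀.go.eq_def (' ' :: tok) cur acc,
        PySem.Chars.split₀.go.eq_def [] cur acc]
    have hsp : PySem.Chars.isspace ' ' = true := by decide
    simp only [hsp, if_true]
    by_cases hc : cur = []
    · simp only [hc, List.isEmpty_nil, if_true]
      rw [split₀_go_nonspace tok hns [] acc]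
      simp [hne]
    · have hce : cur.isEmpty = false := by simpa [List.isEmpty_iff] using hc
      simp only [hce, Bool.false_eq_true, if_false]
      rw [split₀_go_nonspace tok hns [] (cur.reverse :: acc)]
      simp [hne]
  | cons c rest ih =>
    intro cur acc
    simp only [List.cons_append]
    rw [PySem.Chars.split₀.go.eq_def (c :: (rest ++ ' ' :: tok)) cur acc,
        PySem.Chars.split₀.go.eq_def (c :: rest) cur acc]
    by_cases hsp : PySem.Chars.isspace c = true
    · simp only [hsp, if_true]
      by_cases hc : cur.isEmpty <;> simp [hc, ih]
    · simp only [hsp]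
      exact ih (c :: cur) acc

theorem split₀_concat (ts : List (List Char))
    (h : ∀ t ∈ ts, t ≠ [] ∧ ∀ c ∈ t, PySem.Chars.isspace c = false) :
    PySem.Chars.split₀ (ts.foldl (fun code t => code ++ ' ' :: t) []) = ts := by
  induction ts using List.reverseRecOn with
  | nil => decide
  | append_singleton ts t ih =>
    rw [List.foldl_append]
    simp only [List.foldl_cons, List.foldl_nil]
    unfold PySem.Chars.split₀
    rw [split₀_go_append_space_tok t (h t (by simp)).1 (h t (by simp)).2]
    have := ih (fun u hu => h u (by simp [hu]))
    unfold PySem.Chars.split₀ at this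
    rw [this]

-- ---- splitOn with no separator occurrence ----
theorem splitOn_go_no_colon : ∀ (fuel : Nat) (l cur : List Char) (acc : List (List Char)), (':' ∉ l) →
    PySem.Chars.splitOn.go [':'] fuel l cur acc = ((cur.reverse ++ l) :: acc).reverse := by
  intro fuel
  induction fuel with
  | zero => intro l cur acc _; rw [PySem.Chars.splitOn.go.eq_def]
  | succ fuel ih =>
    intro l cur acc hl
    cases l with
    | nil => rw [PySem.Chars.splitOn.go.eq_def]; simp
    | cons c rest =>
      rw [PySem.Chars.splitOn.go.eq_def]
      have hc : c ≠ ':' := fun he => hl (by simp [he])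
      have hpre : List.isPrefixOf [':'] (c :: rest) = false := by
        simp [List.isPrefixOf]; exact fun he => (hc he.symm).elim
      simp only [hpre, Bool.false_eq_true, if_false]
      rw [ih rest (c :: cur) acc (fun hm => hl (by simp [hm]))]
      simp

theorem splitOn_no_colon (l : List Char) (h : ':' ∉ l) :
    PySem.Chars.splitOn l [':'] = [l] := by
  unfold PySem.Chars.splitOn
  rw [splitOn_go_no_colon _ l [] [] h]
  simp

-- ---- fromhex over two-digit tokens ----
theorem pvFromHex_pairs (ts : List (List Char))
    (h : ∀ t ∈ ts, ∃ a b, t = [a, b] ∧ a ≠ ' ' ∧ b ≠ ' ') :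
    pvFromHex (List.flatMap (fun t => ' ' :: t) ts ++ [' ']) =
      ts.map (fun t => 16 * pvHexVal (t.getD 0 ' ') + pvHexVal (t.getD 1 ' ')) := by
  induction ts with
  | nil => decide
  | cons t ts ih =>
    obtain ⟨a, b, ht, ha, hb⟩ := h t (by simp)
    subst ht
    simp only [List.flatMap_cons, List.cons_append, List.append_assoc]
    rw [pvFromHex, pvFromHex]
    simp only [ha, List.nil_append]
    rw [ih (fun u hu => h u (by simp [hu]))]
    simp

-- the padded token for a byte value v < 127: exactly two non-space chars parsing back to v
def pvPadTok (v : Nat) : List Char :=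
  if pvParseHex (pvToHexChars v) < 16 then '0' :: pvToHexChars v else pvToHexChars v

theorem pvToHexChars_one_digit {v : Nat} (h0 : 0 < v) (h16 : v < 16) :
    pvToHexChars v = [pvHexDigitChar v] := by
  unfold pvToHexChars
  rw [if_neg (by omega), pvToHexAux]
  rw [dif_neg (by omega)]
  rw [Nat.div_eq_of_lt h16, Nat.mod_eq_of_lt h16]
  simp [pvToHexAux]

theorem pvToHexChars_two_digit {v : Nat} (h16 : 16 ≤ v) (h256 : v < 256) :
    pvToHexChars v = [pvHexDigitChar (v / 16), pvHexDigitChar (v % 16)] := by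
  unfold pvToHexChars
  rw [if_neg (by omega), pvToHexAux]
  rw [dif_neg (by omega)]
  rw [pvToHexAux]
  rw [dif_neg (by omega)]
  have h1 : v / 16 / 16 = 0 := by omega
  have h2 : v / 16 % 16 = v / 16 := by omega
  rw [h1, h2]
  simp [pvToHexAux]

theorem pvPadTok_spec {v : Nat} (hv : v < 127) :
    ∃ a b, pvPadTok v = [a, b] ∧ a ≠ ' ' ∧ b ≠ ' ' ∧ 16 * pvHexVal a + pvHexVal b = v := by
  have hne : ∀ c, pvIsHexDigit c → c ≠ ' ' := by
    intro c hc he; subst he; rcases hc with ⟨h1, h2⟩ | ⟨h1, h2⟩ <;> simp at h1 h2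
  unfold pvPadTok
  rw [pvParseHex_toHexChars]
  by_cases h16 : v < 16
  · rw [if_pos h16]
    by_cases h0 : v = 0
    · subst h0; exact ⟨'0', '0', by decide, by decide, by decide, by decide⟩
    · rw [pvToHexChars_one_digit (by omega) h16]
      refine ⟨'0', pvHexDigitChar v, rfl, by decide,
        hne _ (pvHexDigitChar_isHex h16), ?_⟩
      rw [pvHexVal_hexDigitChar h16]
      have h0 : pvHexVal '0' = 0 := by decide
      omega
  · rw [if_neg h16]
    rw [pvToHexChars_two_digit (by omega) (by omega)]
    refine ⟨pvHexDigitChar (v / 16), pvHexDigitChar (v % 16), rfl,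
      hne _ (pvHexDigitChar_isHex (by omega)), hne _ (pvHexDigitChar_isHex (by omega)), ?_⟩
    rw [pvHexVal_hexDigitChar (by omega), pvHexVal_hexDigitChar (by omega)]
    omega

theorem pvPadTok_isHex (v : Nat) : ∀ c ∈ pvPadTok v, pvIsHexDigit c := by
  intro c hc
  unfold pvPadTok at hc
  by_cases h : pvParseHex (pvToHexChars v) < 16
  · rw [if_pos h] at hc
    rcases List.mem_cons.1 hc with hc | hc
    · subst hc; exact Or.inl (by decide)
    · exact pvToHexChars_isHex v c hc
  · rw [if_neg h] at hc
    exact pvToHexChars_isHex v c hc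

-- enumerate as a map over range
theorem enumerate_map {α : Type} (f : Int × Char → α) :
    ∀ (xs : List Char) (s : Nat), (PySem.List.enumerate xs s).map f =
      (List.range xs.length).map (fun i => f (((s + i : Nat) : Int), xs.getD i ' ')) := by
  intro xs
  induction xs with
  | nil => intro s; simp [PySem.List.enumerate]
  | cons x xs ih =>
    intro s
    rw [PySem.List.enumerate]
    simp only [List.map_cons, List.length_cons, List.range_succ_eq_map, List.map_map]
    have h1 : ((s : Int) + 1) = ((s + 1 : Nat) : Int) := by push_cast; ring
    rw [h1, ih (s + 1)]
    simp only [Nat.add_zero, List.getD_cons_zero]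
    refine congrArg₂ _ rfl ?_
    apply List.map_congr_left
    intro i _
    have h2 : s + 1 + i = s + (i + 1) := by omega
    simp [Function.comp, h2]

theorem pyMod_nonneg (a b : Nat) (_hb : 0 < b) :
    PySem.Int.mod (a : Int) (b : Int) = ((a % b : Nat) : Int) := by
  simp [PySem.Int.mod, Int.fmod_eq_emod]

-- ===== VERDICT (by name: the statement is the Claim_ definition above) =====
-- every token produced by pvToHexChars is a nonempty word of non-whitespace characters
theorem pvTok_good (n : Nat) :
    pvToHexChars n ≠ [] ∧ ∀ c ∈ pvToHexChars n, PySem.Chars.isspace c = false :=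
  ⟨pvToHexChars_ne_nil n, fun c hc => pvIsHexDigit_not_space (pvToHexChars_isHex n c hc)⟩

-- code_ascii, split back apart, is the per-character token list
theorem split₀_code_ascii (s : String) :
    PySem.Chars.split₀ (code_ascii s).toList = s.toList.map (fun c => pvToHexChars c.toNat) := by
  unfold code_ascii
  rw [String.toList_ofList,
      ← List.foldl_map (f := fun c : Char => pvToHexChars c.toNat)
        (g := fun (code : List Char) t => code ++ ' ' :: t)]
  apply split₀_concat
  intro t ht
  obtain ⟨c, _, rfl⟩ := List.mem_map.1 ht
  exact pvTok_good _

theorem pvPadTok_byte {v : Nat} (hv : v < 127) :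
    16 * pvHexVal ((pvPadTok v).getD 0 ' ') + pvHexVal ((pvPadTok v).getD 1 ' ') = v := by
  obtain ⟨a, b, hab, _, _, hval⟩ := pvPadTok_spec hv
  rw [hab]; simpa using hval

theorem toList_ne_nil {s : String} (h : s ≠ "") : s.toList ≠ [] := by
  intro hk
  exact h (by rw [← @String.ofList_toList s, hk])

theorem code_ascii_key_spec : Claim_equal_code_ascii_key := by
  intro text key _ hpre
  unfold Spec_code_ascii_key code_ascii_key code_ascii_key_alt
  simp only [split₀_code_ascii, List.length_map]
  set l := text.toList with hl
  set k := key.toList with hk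
  set v : Nat → Nat :=
    fun i => ((l.getD i ' ').toNat + (k.getD (i % k.length) ' ').toNat) % 127 with hv
  have hmpos : ∀ i ∈ List.range l.length, 0 < k.length := by
    intro i hi
    rcases hpre with hkey | htext
    · exact List.length_pos_of_ne_nil (toList_ne_nil hkey)
    · rw [List.mem_range] at hi
      exfalso
      have h0 : l = [] := by rw [hl, htext]; rfl
      rw [h0] at hi; simp at hi
  have hloop : List.foldl (fun code i =>
        code ++ ' ' :: pvToHexChars
          ((pvParseHex ((l.map (fun c => pvToHexChars c.toNat)).getD i []) +
            pvParseHex ((k.map (fun c => pvToHexChars c.toNat)).getD (i % k.length) [])) % 127)) []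
        (List.range l.length) =
      List.foldl (fun code i => code ++ ' ' :: pvToHexChars (v i)) [] (List.range l.length) := by
    apply PySem.List.foldl_congr_mem
    intro acc i hi
    have hin : i < l.length := List.mem_range.1 hi
    have hm : 0 < k.length := hmpos i hi
    have hkin : i % k.length < k.length := Nat.mod_lt _ hm
    rw [List.getD_eq_getElem _ _ (by simpa using hin), List.getElem_map,
        List.getD_eq_getElem _ _ (by simpa using hkin), List.getElem_map,
        pvParseHex_toHexChars, pvParseHex_toHexChars]
    rw [show v i = (l[i].toNat + k[i % k.length].toNat) % 127 from by
      simp only [hv]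
      rw [List.getD_eq_getElem _ _ hin, List.getD_eq_getElem _ _ hkin]]
  rw [hloop, ← List.foldl_map (f := fun i => pvToHexChars (v i))
      (g := fun code t => code ++ ' ' :: t)]
  rw [split₀_concat _ (by
    intro t ht
    obtain ⟨i, _, rfl⟩ := List.mem_map.1 ht
    exact pvTok_good _)]
  rw [List.map_map]
  have hpad : ((fun t => if pvParseHex t < 16 then '0' :: t else t) ∘ fun i => pvToHexChars (v i)) =
      fun i => pvPadTok (v i) := rfl
  rw [hpad]
  rw [PySem.List.foldl_append_eq_flatMap (fun t => ' ' :: t)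
      ((List.range l.length).map fun i => pvPadTok (v i)) []]
  rw [List.nil_append]
  unfold decode_ascii
  rw [String.toList_ofList]
  rw [splitOn_no_colon _ (by
    intro hcol
    obtain ⟨t, ht, hct⟩ := List.mem_flatMap.1 hcol
    obtain ⟨i, _, rfl⟩ := List.mem_map.1 ht
    rcases List.mem_cons.1 hct with h0 | h0
    · exact absurd h0.symm (by decide)
    · exact pvIsHexDigit_ne_colon (pvPadTok_isHex _ _ h0) rfl)]
  simp only [List.foldl_cons, List.foldl_nil, List.nil_append]
  have hv127 : ∀ i, v i < 127 := fun i => Nat.mod_lt _ (by norm_num)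
  rw [pvFromHex_pairs _ (by
    intro t ht
    obtain ⟨i, _, rfl⟩ := List.mem_map.1 ht
    obtain ⟨a, b, hab, ha, hb, _⟩ := pvPadTok_spec (hv127 i)
    exact ⟨a, b, hab, ha, hb⟩)]
  congr 1
  rw [show PySem.List.enumerate l = PySem.List.enumerate l ((0 : Nat) : Int) from by norm_num,
      enumerate_map]
  simp only [List.map_map]
  apply List.map_congr_left
  intro i hi
  have hm : 0 < k.length := hmpos i hi
  simp only [Function.comp_apply, Nat.zero_add]
  rw [pvPadTok_byte (hv127 i)]
  rw [pyMod_nonneg i k.length hm, PySem.List.pyGet?_natCast, ← List.getD_eq_getElem?_getD]
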